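-- pv_equiv track=rewrite | github.com/AlissonCod/Validador-De-Inserts-PL-SQL---Local | validador_insert/validator.py | _extrair_lista_parenteses
-- ===== SOURCE A (Python) =====
-- def _extrair_lista_parenteses(texto: str, pos_inicial: int):
--     i = pos_inicial
--     while i < len(texto) and texto[i] != '(': i += 1
--     if i >= len(texto): return [], i, "Parêntese '(' não encontrado."
--
--     i += 1
--     nivel, em_string, buf, item_buf = 1, False, [], []
--     while i < len(texto) and nivel > 0:
--         c = texto[i]
--         if c == "'": em_string = not em_string
--         elif not em_string:
--             if c == '(': nivel += 1
--             elif c == ')': nivel -= 1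
--             elif c == ',' and nivel == 1:
--                 buf.append(''.join(item_buf).strip())
--                 item_buf = []
--                 i += 1; continue
--         if nivel > 0: item_buf.append(c)
--         i += 1
--     buf.append(''.join(item_buf).strip())
--     return buf, i, ""
-- ===== SOURCE B (Python) =====
-- def _extrair_lista_parenteses(texto: str, pos_inicial: int):
--     n = len(texto)
--     # locate the opening parenthesis
--     i = pos_inicial
--     while i < n and texto[i] != '(':
--         i += 1
--     if i >= n:
--         return [], i, "Parêntese '(' não encontrado."
--     # phase 1: walk to the matching ')' collecting the raw inner content
--     i += 1
--     inner = []
--     nivel, em_string = 1, False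
--     while i < n and nivel > 0:
--         c = texto[i]
--         if c == "'":
--             em_string = not em_string
--         elif not em_string:
--             if c == '(':
--                 nivel += 1
--             elif c == ')':
--                 nivel -= 1
--         if nivel > 0:
--             inner.append(c)
--         i += 1
--     # phase 2: split the raw content on top-level commas
--     itens, seg = [], []
--     nivel, em_string = 1, False
--     for c in inner:
--         if c == "'":
--             em_string = not em_string
--         elif not em_string:
--             if c == '(':
--                 nivel += 1
--             elif c == ')':
--                 nivel -= 1
--         if c == ',' and nivel == 1 and not em_string:
--             itens.append(''.join(seg).strip())
--             seg = []
--         else: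
--             seg.append(c)
--     itens.append(''.join(seg).strip())
--     return itens, i, ""
-- ===== Notes on version B (the rewrite author's own statement) =====
-- stated objective: simpler
-- what changed: A's single fused loop that simultaneously tracks nesting, quote state, the current item and the result list is decomposed into two independent phases: phase 1 only finds the matching close paren and collects the raw inner content, phase 2 separately splits that content on top-level commas.
import Mathlib
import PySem

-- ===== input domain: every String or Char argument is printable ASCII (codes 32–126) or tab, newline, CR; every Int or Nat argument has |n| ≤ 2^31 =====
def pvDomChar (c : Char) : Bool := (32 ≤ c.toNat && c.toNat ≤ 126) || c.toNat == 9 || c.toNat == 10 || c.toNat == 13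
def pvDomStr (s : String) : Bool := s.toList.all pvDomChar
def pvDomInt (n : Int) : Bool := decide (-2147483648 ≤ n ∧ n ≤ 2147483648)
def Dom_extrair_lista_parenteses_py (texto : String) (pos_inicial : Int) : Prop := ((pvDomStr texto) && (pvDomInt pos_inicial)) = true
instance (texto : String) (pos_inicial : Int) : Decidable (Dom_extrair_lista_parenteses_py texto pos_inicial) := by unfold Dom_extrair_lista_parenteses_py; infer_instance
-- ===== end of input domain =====

-- B replaces A's single fused scan by two independent phases (find the matching paren / split the
-- raw content on top-level commas) for clarity; same O(n) cost.

-- ===== PORT A =====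
-- while i < len(texto) and texto[i] != '(': i += 1
def pvFindA (t : List Char) (i : Int) : Nat → Int
  | 0 => i
  | fuel+1 =>
    if i < (t.length : Int) then
      match PySem.List.pyGet? t i with
      | some c => if c ≠ '(' then pvFindA t (i+1) fuel else i
      | none => i
    else i

-- A's main while loop; 'if nivel > 0: item_buf.append(c)' is distributed over the branches
-- (nivel is unchanged or increased everywhere except the ')' branch).
def pvLoopA (t : List Char) : Nat → Int → Int → Bool → List String → List Char → List String × Int × String
  | 0, i, _, _, buf, item => (buf ++ [String.ofList (PySem.Chars.strip item)], i, "")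
  | fuel+1, i, nivel, em, buf, item =>
    if i < (t.length : Int) ∧ 0 < nivel then
      match PySem.List.pyGet? t i with
      | none => (buf ++ [String.ofList (PySem.Chars.strip item)], i, "")  -- unreachable under Pre_
      | some c =>
        if c = '\'' then pvLoopA t fuel (i+1) nivel (!em) buf (item ++ [c])
        else if !em then
          if c = '(' then pvLoopA t fuel (i+1) (nivel+1) em buf (item ++ [c])
          else if c = ')' then
            pvLoopA t fuel (i+1) (nivel-1) em buf (if 0 < nivel-1 then item ++ [c] else item)
          else if c = ',' ∧ nivel = 1 then
            pvLoopA t fuel (i+1) nivel em (buf ++ [String.ofList (PySem.Chars.strip item)]) []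
          else pvLoopA t fuel (i+1) nivel em buf (item ++ [c])
        else pvLoopA t fuel (i+1) nivel em buf (item ++ [c])
    else (buf ++ [String.ofList (PySem.Chars.strip item)], i, "")

def extrair_lista_parenteses_py (texto : String) (pos_inicial : Int) : List String × Int × String :=
  let t := texto.toList
  let i := pvFindA t pos_inicial ((t.length - pos_inicial).toNat)
  if (t.length : Int) ≤ i then ([], i, "Parêntese '(' não encontrado.")
  else pvLoopA t ((t.length - (i+1)).toNat) (i+1) 1 false [] []

-- ===== PORT B =====
def pvFindB (t : List Char) (i : Int) : Nat → Int
  | 0 => i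
  | fuel+1 =>
    if i < (t.length : Int) then
      match PySem.List.pyGet? t i with
      | some c => if c ≠ '(' then pvFindB t (i+1) fuel else i
      | none => i
    else i

-- phase 1: walk to the matching ')' collecting the raw inner content
def pvLoopB1 (t : List Char) : Nat → Int → Int → Bool → List Char → List Char × Int
  | 0, i, _, _, inner => (inner, i)
  | fuel+1, i, nivel, em, inner =>
    if i < (t.length : Int) ∧ 0 < nivel then
      match PySem.List.pyGet? t i with
      | none => (inner, i)  -- unreachable under Pre_
      | some c =>
        if c = '\'' then pvLoopB1 t fuel (i+1) nivel (!em) (inner ++ [c])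
        else if !em then
          if c = '(' then pvLoopB1 t fuel (i+1) (nivel+1) em (inner ++ [c])
          else if c = ')' then
            pvLoopB1 t fuel (i+1) (nivel-1) em (if 0 < nivel-1 then inner ++ [c] else inner)
          else pvLoopB1 t fuel (i+1) nivel em (inner ++ [c])
        else pvLoopB1 t fuel (i+1) nivel em (inner ++ [c])
    else (inner, i)

-- phase 2: split the raw content on top-level commas
def pvLoopB2 : List Char → Int → Bool → List String → List Char → List String
  | [], _, _, itens, seg => itens ++ [String.ofList (PySem.Chars.strip seg)]
  | c :: rest, nivel, em, itens, seg =>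
    if c = '\'' then pvLoopB2 rest nivel (!em) itens (seg ++ [c])
    else if !em then
      if c = '(' then pvLoopB2 rest (nivel+1) em itens (seg ++ [c])
      else if c = ')' then pvLoopB2 rest (nivel-1) em itens (seg ++ [c])
      else if c = ',' ∧ nivel = 1 then
        pvLoopB2 rest nivel em (itens ++ [String.ofList (PySem.Chars.strip seg)]) []
      else pvLoopB2 rest nivel em itens (seg ++ [c])
    else pvLoopB2 rest nivel em itens (seg ++ [c])

def extrair_lista_parenteses_py_alt (texto : String) (pos_inicial : Int) : List String × Int × String :=
  let t := texto.toList
  let i := pvFindB t pos_inicial ((t.length - pos_inicial).toNat)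
  if (t.length : Int) ≤ i then ([], i, "Parêntese '(' não encontrado.")
  else
    let p := pvLoopB1 t ((t.length - (i+1)).toNat) (i+1) 1 false []
    (pvLoopB2 p.1 1 false [] [], p.2, "")

-- ===== PRECONDITION & SPEC =====
-- Pre_ excludes only pos_inicial < -len(texto): there Python A's very first element access
-- texto[pos_inicial] raises IndexError (and B raises identically); A returns on everything else.
def Pre_extrair_lista_parenteses_py (texto : String) (pos_inicial : Int) : Prop :=
  -(texto.toList.length : Int) ≤ pos_inicial
instance (texto : String) (pos_inicial : Int) : Decidable (Pre_extrair_lista_parenteses_py texto pos_inicial) := by unfold Pre_extrair_lista_parenteses_py; infer_instance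

def pvWitness_extrair_lista_parenteses_py : String × Int := ("f('a,b', (1,2), x)", 0)

def Spec_extrair_lista_parenteses_py (texto : String) (pos_inicial : Int) (out : List String × Int × String) : Prop := out = extrair_lista_parenteses_py_alt texto pos_inicial
instance (texto : String) (pos_inicial : Int) (out : List String × Int × String) : Decidable (Spec_extrair_lista_parenteses_py texto pos_inicial out) := by unfold Spec_extrair_lista_parenteses_py; infer_instance

-- ===== CLAIM (what is proved, stated in full; the proofs are below) =====
def Claim_equal_extrair_lista_parenteses_py : Prop := ∀ (texto : String) (pos_inicial : Int), Dom_extrair_lista_parenteses_py texto pos_inicial → Pre_extrair_lista_parenteses_py texto pos_inicial → Spec_extrair_lista_parenteses_py texto pos_inicial (extrair_lista_parenteses_py texto pos_inicial)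

-- ===== LEMMAS AND PROOFS =====

theorem pvFind_eq (t : List Char) : ∀ (fuel : Nat) (i : Int), pvFindA t i fuel = pvFindB t i fuel := by
  intro fuel
  induction fuel with
  | zero => intro i; rfl
  | succ f ih =>
    intro i
    simp only [pvFindA, pvFindB]
    split
    · cases PySem.List.pyGet? t i with
      | none => rfl
      | some c =>
        by_cases hc : c = '('
        · simp [hc]
        · simp [hc, ih]
    · rfl

theorem pvLoopA_nonpos (t : List Char) (fuel : Nat) (i nivel : Int) (em : Bool)
    (buf : List String) (item : List Char) (h : nivel ≤ 0) :
    pvLoopA t fuel i nivel em buf item = (buf ++ [String.ofList (PySem.Chars.strip item)], i, "") := by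
  cases fuel with
  | zero => rfl
  | succ f => simp only [pvLoopA]; rw [if_neg]; omega

theorem pvLoopB1_nonpos (t : List Char) (fuel : Nat) (i nivel : Int) (em : Bool)
    (inner : List Char) (h : nivel ≤ 0) :
    pvLoopB1 t fuel i nivel em inner = (inner, i) := by
  cases fuel with
  | zero => rfl
  | succ f => simp only [pvLoopB1]; rw [if_neg]; omega

theorem pvLoopB1_acc (t : List Char) : ∀ (fuel : Nat) (i nivel : Int) (em : Bool) (xs ys : List Char),
    pvLoopB1 t fuel i nivel em (xs ++ ys) =
      (xs ++ (pvLoopB1 t fuel i nivel em ys).1, (pvLoopB1 t fuel i nivel em ys).2) := by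
  intro fuel
  induction fuel with
  | zero => intro i nivel em xs ys; rfl
  | succ f ih =>
    intro i nivel em xs ys
    simp only [pvLoopB1]
    split
    · cases PySem.List.pyGet? t i with
      | none => rfl
      | some c =>
        by_cases h1 : c = '\''
        · simp only [if_pos h1, List.append_assoc, ih]
        · by_cases h2 : em
          · simp only [if_neg h1, h2, Bool.not_true, Bool.false_eq_true, if_false,
              List.append_assoc, ih]
          · by_cases h3 : c = '('
            · simp only [if_neg h1, h2, Bool.not_false, if_true, if_pos h3,
                List.append_assoc, ih]
            · by_cases h4 : c = ')'
              · by_cases h5 : 0 < nivel - 1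
                · simp only [if_neg h1, h2, Bool.not_false, if_true, if_neg h3, if_pos h4,
                    if_pos h5, List.append_assoc, ih]
                · simp only [if_neg h1, h2, Bool.not_false, if_true, if_neg h3, if_pos h4,
                    if_neg h5, ih]
              · simp only [if_neg h1, h2, Bool.not_false, if_true, if_neg h3, if_neg h4,
                  List.append_assoc, ih]
    · rfl

theorem pvLoopB1_acc_one (t : List Char) (fuel : Nat) (i nivel : Int) (em : Bool) (c : Char) :
    pvLoopB1 t fuel i nivel em [c] =
      (c :: (pvLoopB1 t fuel i nivel em []).1, (pvLoopB1 t fuel i nivel em []).2) := by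
  have := pvLoopB1_acc t fuel i nivel em [c] []
  simpa using this

-- the heart of the equivalence: A's fused loop = phase 1 followed by phase 2 replaying the state
theorem pvMain (t : List Char) : ∀ (fuel : Nat) (i nivel : Int) (em : Bool)
    (buf : List String) (item : List Char),
    pvLoopA t fuel i nivel em buf item =
      (pvLoopB2 (pvLoopB1 t fuel i nivel em []).1 nivel em buf item,
       (pvLoopB1 t fuel i nivel em []).2, "") := by
  intro fuel
  induction fuel with
  | zero => intro i nivel em buf item; rfl
  | succ f ih =>
    intro i nivel em buf item
    simp only [pvLoopA, pvLoopB1]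
    split
    case isFalse h => rfl
    case isTrue h =>
      cases hg : PySem.List.pyGet? t i with
      | none => rfl
      | some c =>
        by_cases h1 : c = '\''
        · simp [h1]
          rw [pvLoopB1_acc_one, ih]
          simp [pvLoopB2]
        · by_cases h2 : em
          · simp [h1, h2]
            rw [pvLoopB1_acc_one, ih]
            simp [pvLoopB2, h1]
          · simp only [if_neg h1, h2, Bool.not_false, if_true]
            by_cases h3 : c = '('
            · simp [h3]
              rw [pvLoopB1_acc_one, ih]
              simp [pvLoopB2]
            · by_cases h4 : c = ')'
              · simp [h4]
                by_cases h5 : (1:Int) < nivel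
                · simp only [if_pos h5]
                  rw [pvLoopB1_acc_one, ih]
                  simp [pvLoopB2]
                · simp only [if_neg h5]
                  rw [pvLoopA_nonpos t f (i+1) (nivel-1) false buf item (by omega)]
                  rw [pvLoopB1_nonpos t f (i+1) (nivel-1) false [] (by omega)]
                  rfl
              · by_cases h6 : c = ',' ∧ nivel = 1
                · simp [h6.1, h6.2]
                  rw [pvLoopB1_acc_one, ih]
                  simp [pvLoopB2]
                · simp [h3, h4, if_neg h6]
                  rw [pvLoopB1_acc_one, ih]
                  by_cases hc : c = ','
                  · have hn : ¬ nivel = 1 := fun hh => h6 ⟨hc, hh⟩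
                    simp [pvLoopB2, hc, hn]
                  · simp [pvLoopB2, h1, h3, h4, hc]

-- ===== VERDICT (by name: the statement is the Claim_ definition above) =====
theorem extrair_lista_parenteses_py_spec : Claim_equal_extrair_lista_parenteses_py := by
  intro texto pos_inicial _ _
  unfold Spec_extrair_lista_parenteses_py
  simp only [extrair_lista_parenteses_py, extrair_lista_parenteses_py_alt, pvFind_eq]
  split
  · rfl
  · rw [pvMain]
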